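-- pv_equiv track=rewrite | github.com/codybartfast/aoc-2015-py | day20.py | part2
-- ===== SOURCE A (Python) =====
-- def part2(data, ans1=None):
--     houses = [0] * data
--     happy_house = 10**18
--     elf = 1
--     while elf < min(data, happy_house):
--         for house in range(elf, min(data, elf + elf * 50), elf):
--             present_count = houses[house] + 11 * elf
--             if present_count >= data:
--                 happy_house = min(happy_house, house)
--             houses[house] += 11 * elf
--         elf += 1
--     return happy_house
-- ===== SOURCE B (Python) =====
-- def part2(data, ans1=None):
--     # Per-house closed computation: the elves delivering to house h are exactly
--     # its divisors e with h <= 50*e, i.e. the cofactors k = h // e with k <= 50.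
--     for house in range(1, data):
--         total = 0
--         for k in range(1, 51):
--             if house % k == 0:
--                 total += house // k
--         if 11 * total >= data:
--             return house
--     return 10**18
-- ===== Notes on version B (the rewrite author's own statement) =====
-- stated objective: faster
-- what changed: Replaces the per-elf sieve that allocates and accumulates an O(data) houses array (with a mutable happy_house cutoff) by a direct per-house present count: for each house in ascending order, sum its qualifying divisors as the 50 cofactor trials house//k for k=1..50 dividing house, and return the first house reaching the threshold.
import Mathlib
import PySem

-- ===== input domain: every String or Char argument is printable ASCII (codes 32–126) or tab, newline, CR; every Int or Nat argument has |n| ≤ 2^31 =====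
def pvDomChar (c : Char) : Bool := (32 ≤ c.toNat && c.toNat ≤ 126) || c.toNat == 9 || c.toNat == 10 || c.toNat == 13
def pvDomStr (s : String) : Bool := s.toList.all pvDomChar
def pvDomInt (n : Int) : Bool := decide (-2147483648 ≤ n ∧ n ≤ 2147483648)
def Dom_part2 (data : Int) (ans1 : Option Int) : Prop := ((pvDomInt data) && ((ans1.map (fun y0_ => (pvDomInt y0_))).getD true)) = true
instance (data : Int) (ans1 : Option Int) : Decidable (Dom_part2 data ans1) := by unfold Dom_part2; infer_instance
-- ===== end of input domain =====

-- B re-implements the elf sieve as a per-house divisor sum and returns at the first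
-- qualifying house, avoiding the O(data) houses array (objective: faster, constant factor).

-- ===== PORT A =====
-- one iteration of A's inner 'for house in range(elf, min(data, elf + elf*50), elf)' body;
-- state is (houses, happy_house).  houses[house] is read with pyGetD 0: the index is
-- provably in range (elf ≤ house < data = len(houses)), so this matches Python exactly.
def part2InnerStep (data elf : Int) (st : List Int × Int) (house : Int) : List Int × Int :=
  let present_count := PySem.List.pyGetD st.1 house 0 + 11 * elf
  let happy := if data ≤ present_count then min st.2 house else st.2
  (PySem.List.pySetD st.1 house (PySem.List.pyGetD st.1 house 0 + 11 * elf), happy)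

-- the inner-loop min only lowers happy_house (needed for termination of the while loop)
theorem part2InnerStep_snd_le (data elf : Int) (L : List Int) (st : List Int × Int) :
    (L.foldl (part2InnerStep data elf) st).2 ≤ st.2 := by
  induction L generalizing st with
  | nil => simp
  | cons x t ih =>
    refine le_trans (ih _) ?_
    simp only [part2InnerStep]
    split
    · exact min_le_left _ _
    · exact le_refl _

-- A's while loop
def part2Loop (data : Int) (houses : List Int) (happy elf : Int) : Int :=
  if elf < min data happy then
    let st := (PySem.List.pyRange elf (min data (elf + elf * 50)) elf).foldl
      (part2InnerStep data elf) (houses, happy)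
    part2Loop data st.1 st.2 (elf + 1)
  else happy
termination_by (min data happy - elf).toNat
decreasing_by
  have h := part2InnerStep_snd_le data elf
    (PySem.List.pyRange elf (min data (elf + elf * 50)) elf) (houses, happy)
  simp only at h ⊢
  omega

def part2 (data : Int) (ans1 : Option Int) : Int :=
  part2Loop data (List.replicate data.toNat 0) (10 ^ 18) 1

-- ===== PORT B =====
-- total = sum over k in range(1, 51) of house//k when k divides house
def part2AltSig (house : Int) : Int :=
  (PySem.List.pyRange 1 51 1).foldl
    (fun total k => if PySem.Int.mod house k = 0 then total + PySem.Int.floordiv house k else total) 0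

-- 'for house in range(1, data): … return house' with the fall-through return
def part2AltLoop (data house : Int) : Int :=
  if house < data then
    if data ≤ 11 * part2AltSig house then house
    else part2AltLoop data (house + 1)
  else 10 ^ 18
termination_by (data - house).toNat
decreasing_by omega

def part2_alt (data : Int) (ans1 : Option Int) : Int :=
  part2AltLoop data 1

-- ===== PRECONDITION & SPEC =====
def Spec_part2 (data : Int) (ans1 : Option Int) (out : Int) : Prop := out = part2_alt data ans1
instance (data : Int) (ans1 : Option Int) (out : Int) : Decidable (Spec_part2 data ans1 out) := by unfold Spec_part2; infer_instance

-- ===== CLAIM (what is proved, stated in full; the proofs are below) =====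
def Claim_equal_part2 : Prop := ∀ (data : Int) (ans1 : Option Int), Dom_part2 data ans1 → Spec_part2 data ans1 (part2 data ans1)

def sigN (n E : ℕ) : ℕ := ∑ e ∈ Finset.Icc 1 E, if e ∣ n ∧ n ≤ 50 * e then e else 0

theorem sig_zero (n : ℕ) : sigN n 0 = 0 := by simp [sigN]

theorem sig_succ (n E : ℕ) : sigN n (E + 1) = sigN n E + if (E + 1) ∣ n ∧ n ≤ 50 * (E + 1) then E + 1 else 0 := by
  unfold sigN
  rw [← Finset.sum_Icc_succ_top (by omega : 1 ≤ E + 1)]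

theorem sig_mono (n : ℕ) {E E' : ℕ} (h : E ≤ E') : sigN n E ≤ sigN n E' := by
  apply Finset.sum_le_sum_of_subset
  intro x hx
  simp only [Finset.mem_Icc] at *
  omega

theorem sig_stable (n : ℕ) {E : ℕ} (hn : 1 ≤ n) (h : n ≤ E) : sigN n E = sigN n n := by
  unfold sigN
  symm
  apply Finset.sum_subset
  · intro x hx; simp only [Finset.mem_Icc] at *; omega
  · intro x hx hx'
    simp only [Finset.mem_Icc] at hx hx'
    rw [if_neg]
    rintro ⟨hdvd, -⟩
    have := Nat.le_of_dvd (by omega) hdvd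
    omega

theorem sig_le_full (n E : ℕ) (hn : 1 ≤ n) : sigN n E ≤ sigN n n := by
  rcases le_or_gt E n with h | h
  · exact sig_mono n h
  · exact le_of_eq (sig_stable n hn (by omega))

theorem sum_cofactor (n : ℕ) (hn : 1 ≤ n) :
    (∑ k ∈ Finset.range 50, if (k + 1) ∣ n then n / (k + 1) else 0) = sigN n n := by
  unfold sigN
  rw [← Finset.sum_filter, ← Finset.sum_filter]
  apply Finset.sum_nbij' (i := fun k => n / (k + 1)) (j := fun e => n / e - 1)
  · -- i maps into target
    intro k hk
    simp only [Finset.mem_filter, Finset.mem_range] at hk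
    obtain ⟨hk50, hdvd⟩ := hk
    obtain ⟨c, hc⟩ := hdvd
    have hc1 : n / (k + 1) = c := by rw [hc]; exact Nat.mul_div_cancel_left _ (by omega)
    have hcpos : 1 ≤ c := Nat.pos_of_ne_zero (by rintro rfl; rw [Nat.mul_zero] at hc; omega)
    simp only [Finset.mem_filter, Finset.mem_Icc, hc1]
    refine ⟨⟨hcpos, Nat.le_of_dvd (by omega) ⟨k + 1, by rw [hc]; ring⟩⟩, ⟨k + 1, by rw [hc]; ring⟩, ?_⟩
    calc n = (k + 1) * c := hc
      _ ≤ 50 * c := Nat.mul_le_mul_right c (by omega)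
  · -- j maps back into source
    intro e he
    simp only [Finset.mem_filter, Finset.mem_Icc] at he
    obtain ⟨⟨he1, hen⟩, hdvd, h50⟩ := he
    obtain ⟨c, hc⟩ := hdvd
    have hc1 : n / e = c := by rw [hc]; exact Nat.mul_div_cancel_left _ (by omega)
    have hcpos : 1 ≤ c := Nat.pos_of_ne_zero (by rintro rfl; rw [Nat.mul_zero] at hc; omega)
    have hc50 : c ≤ 50 := by
      have : e * c ≤ e * 50 := by rw [← hc]; calc n ≤ 50 * e := h50
                                                _ = e * 50 := by ring
      exact Nat.le_of_mul_le_mul_left this (by omega)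
    simp only [Finset.mem_filter, Finset.mem_range, hc1]
    exact ⟨by omega, by rw [Nat.sub_add_cancel hcpos]; exact ⟨e, by rw [hc]; ring⟩⟩
  · -- left inverse
    intro k hk
    simp only [Finset.mem_filter, Finset.mem_range] at hk
    have := Nat.div_div_self hk.2 (by omega)
    omega
  · -- right inverse
    intro e he
    simp only [Finset.mem_filter, Finset.mem_Icc] at he
    obtain ⟨⟨he1, hen⟩, hdvd, h50⟩ := he
    have hdd := Nat.div_div_self hdvd (by omega)
    have : 1 ≤ n / e := (Nat.one_le_div_iff (by omega)).mpr hen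
    rw [Nat.sub_add_cancel this, hdd]
  · -- values agree
    intro k hk
    rfl

theorem foldl_modsum (m : Int) : ∀ (l : List ℕ) (a : Int),
    List.foldl (fun (x y : Int) => if PySem.Int.mod m y = 0 then x + PySem.Int.floordiv m y else x) a
      (List.map (fun k : ℕ => 1 + (k : Int)) l)
    = a + (List.map (fun k : ℕ => if PySem.Int.mod m (1 + (k : Int)) = 0
        then PySem.Int.floordiv m (1 + (k : Int)) else (0 : Int)) l).sum := by
  intro l
  induction l with
  | nil => intro a; simp
  | cons x t ih =>
    intro a
    simp only [List.map_cons, List.foldl_cons, List.sum_cons, ih]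
    split <;> ring

theorem listsum_range (m : ℕ) (g : ℕ → Int) :
    ((List.range m).map g).sum = ∑ k ∈ Finset.range m, g k := by
  induction m with
  | zero => simp
  | succ m ih => rw [List.range_succ, Finset.sum_range_succ, List.map_append, List.sum_append, ih]; simp

theorem altSig_eq (house : Int) (h1 : 1 ≤ house) :
    part2AltSig house = (sigN house.toNat house.toNat : Int) := by
  obtain ⟨n, rfl⟩ : ∃ n : ℕ, house = (n : Int) := ⟨house.toNat, by omega⟩
  have hn : 1 ≤ n := by omega
  unfold part2AltSig
  rw [PySem.List.pyRange_one, foldl_modsum, zero_add]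
  have hrw : ∀ k : ℕ,
      (if PySem.Int.mod (n : Int) (1 + (k : Int)) = 0
        then PySem.Int.floordiv (n : Int) (1 + (k : Int)) else (0 : Int))
      = ((if (k + 1) ∣ n then n / (k + 1) else 0 : ℕ) : Int) := by
    intro k
    have hcast : (1 + (k : Int)) = ((k + 1 : ℕ) : Int) := by push_cast; ring
    rw [hcast, PySem.Int.mod_natCast, PySem.Int.floordiv_natCast]
    by_cases h : (k + 1) ∣ n
    · obtain ⟨c, rfl⟩ := h
      have h0 : (k + 1) * c % (k + 1) = 0 := Nat.mul_mod_right _ _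
      simp [h0]
    · have h0 : n % (k + 1) ≠ 0 := fun hc => h (Nat.dvd_iff_mod_eq_zero.mpr hc)
      rw [if_neg (fun hc => h0 (by exact_mod_cast hc)), if_neg h]
      simp
  calc (List.map (fun k : ℕ => if PySem.Int.mod (n : Int) (1 + (k : Int)) = 0
          then PySem.Int.floordiv (n : Int) (1 + (k : Int)) else (0 : Int)) (List.range ((51 - 1 : Int)).toNat)).sum
      = ∑ k ∈ Finset.range 50, ((if (k + 1) ∣ n then n / (k + 1) else 0 : ℕ) : Int) := by
        rw [listsum_range]
        have : ((51 - 1 : Int)).toNat = 50 := by decide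
        rw [this]
        exact Finset.sum_congr rfl (fun k _ => hrw k)
    _ = ((∑ k ∈ Finset.range 50, if (k + 1) ∣ n then n / (k + 1) else 0 : ℕ) : Int) := by
        push_cast [apply_ite (fun x : ℕ => (x : Int))]
        rfl
    _ = (sigN ((n : Int)).toNat ((n : Int)).toNat : Int) := by
        rw [Int.toNat_natCast, sum_cofactor n hn]

def happyStep (data elf : Int) (houses : List Int) (acc h : Int) : Int :=
  if data ≤ PySem.List.pyGetD houses h 0 + 11 * elf then min acc h else acc

theorem happyFold_le (data elf : Int) (houses : List Int) :
    ∀ (L : List Int) (acc : Int), L.foldl (happyStep data elf houses) acc ≤ acc := by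
  intro L
  induction L with
  | nil => intro acc; simp
  | cons x t ih =>
    intro acc
    refine le_trans (ih _) ?_
    unfold happyStep
    split
    · exact min_le_left _ _
    · exact le_refl _

theorem happyFold_le_mem (data elf : Int) (houses : List Int) :
    ∀ (L : List Int) (acc h : Int), h ∈ L →
      data ≤ PySem.List.pyGetD houses h 0 + 11 * elf →
      L.foldl (happyStep data elf houses) acc ≤ h := by
  intro L
  induction L with
  | nil => intro acc h hm; simp at hm
  | cons x t ih =>
    intro acc h hm hcond
    rcases List.mem_cons.mp hm with rfl | hm'
    · refine le_trans (happyFold_le data elf houses t _) ?_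
      simp only [happyStep, if_pos hcond]
      exact min_le_right _ _
    · exact ih _ h hm' hcond

theorem happyFold_cases (data elf : Int) (houses : List Int) :
    ∀ (L : List Int) (acc : Int),
      L.foldl (happyStep data elf houses) acc = acc ∨
      ∃ h ∈ L, (data ≤ PySem.List.pyGetD houses h 0 + 11 * elf) ∧
        L.foldl (happyStep data elf houses) acc = h := by
  intro L
  induction L with
  | nil => intro acc; left; rfl
  | cons x t ih =>
    intro acc
    rcases ih (happyStep data elf houses acc x) with h | ⟨h, hm, hc, he⟩
    · simp only [List.foldl_cons, h]
      unfold happyStep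
      split
      · rcases min_cases acc x with ⟨he, -⟩ | ⟨he, -⟩
        · left; exact he
        · right; exact ⟨x, List.mem_cons_self, by assumption, he⟩
      · left; rfl
    · right
      exact ⟨h, List.mem_cons_of_mem _ hm, hc, he⟩

theorem pyGet_set_ne (houses : List Int) (x h v : Int) (hx : 0 ≤ x) (hh : 0 ≤ h) (hne : x ≠ h) :
    PySem.List.pyGetD (PySem.List.pySetD houses x v) h 0 = PySem.List.pyGetD houses h 0 := by
  rw [PySem.List.pySetD_of_nonneg _ _ hx, PySem.List.pyGetD_of_nonneg _ _ hh,
    PySem.List.pyGetD_of_nonneg _ _ hh]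
  rw [List.getD_eq_getElem?_getD, List.getD_eq_getElem?_getD, List.getElem?_set]
  rw [if_neg]
  omega

theorem innerFold_spec (data elf : Int) :
    ∀ (L : List Int) (houses : List Int) (happy : Int),
      (∀ x ∈ L, 1 ≤ x) → L.Nodup →
      ((L.foldl (part2InnerStep data elf) (houses, happy)).1.length = houses.length ∧
       (∀ i : ℕ, (L.foldl (part2InnerStep data elf) (houses, happy)).1.getD i 0
         = houses.getD i 0 + (if (i : Int) ∈ L ∧ i < houses.length then 11 * elf else 0)) ∧
       (L.foldl (part2InnerStep data elf) (houses, happy)).2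
         = L.foldl (happyStep data elf houses) happy) := by
  intro L
  induction L with
  | nil =>
    intro houses happy _ _
    refine ⟨rfl, fun i => by simp, rfl⟩
  | cons x t ih =>
    intro houses happy hpos hnd
    have hx1 : 1 ≤ x := hpos x List.mem_cons_self
    have hxt : x ∉ t := (List.nodup_cons.mp hnd).1
    set houses' := PySem.List.pySetD houses x (PySem.List.pyGetD houses x 0 + 11 * elf) with hh'
    have hlen' : houses'.length = houses.length := by
      rw [hh', PySem.List.pySetD_of_nonneg _ _ (by omega)]; exact List.length_set ..
    obtain ⟨ihlen, ihget, ihsnd⟩ := ih houses' (happyStep data elf houses happy x)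
      (fun y hy => hpos y (List.mem_cons_of_mem _ hy)) (List.nodup_cons.mp hnd).2
    have hstep : part2InnerStep data elf (houses, happy) x
        = (houses', happyStep data elf houses happy x) := rfl
    have hget' : ∀ i : ℕ, houses'.getD i 0
        = houses.getD i 0 + (if (i : Int) = x ∧ i < houses.length then 11 * elf else 0) := by
      intro i
      rw [hh', PySem.List.pySetD_of_nonneg _ _ (by omega : (0:Int) ≤ x),
        PySem.List.pyGetD_of_nonneg _ _ (by omega : (0:Int) ≤ x)]
      rw [List.getD_eq_getElem?_getD, List.getD_eq_getElem?_getD, List.getElem?_set]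
      by_cases hix : (i : Int) = x
      · have hxi : x.toNat = i := by omega
        rw [hxi, if_pos rfl]
        by_cases hlt : i < houses.length
        · rw [if_pos hlt, if_pos ⟨hix, hlt⟩]
          simp [List.getD_eq_getElem?_getD]
        · rw [if_neg hlt, if_neg (by tauto)]
          simp [List.getD_eq_getElem?_getD, List.getElem?_eq_none_iff.mpr (show houses.length ≤ i by omega)]
      · rw [if_neg (show ¬x.toNat = i by omega), if_neg (by tauto)]
        simp
    refine ⟨by rw [List.foldl_cons, hstep, ihlen, hlen'], fun i => ?_, ?_⟩
    · rw [List.foldl_cons, hstep, ihget i, hget' i, hlen']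
      by_cases hix : (i : Int) = x
      · have hit : (i : Int) ∉ t := by rw [hix]; exact hxt
        by_cases hlt : i < houses.length
        · rw [if_pos ⟨hix, hlt⟩, if_neg (by tauto), if_pos ⟨List.mem_cons.mpr (Or.inl hix), hlt⟩]
          ring
        · rw [if_neg (by tauto), if_neg (by tauto), if_neg (by tauto)]
          ring
      · rw [if_neg (by tauto)]
        by_cases hmt : (i : Int) ∈ t ∧ i < houses.length
        · rw [if_pos hmt, if_pos ⟨List.mem_cons.mpr (Or.inr hmt.1), hmt.2⟩]; ring
        · rw [if_neg hmt, if_neg (by rw [List.mem_cons]; tauto)]; ring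
    · rw [List.foldl_cons, hstep, ihsnd, List.foldl_cons]
      refine List.foldl_ext _ _ _ (fun acc y hy => ?_)
      unfold happyStep
      rw [pyGet_set_ne houses x y _ (by omega) (by have := hpos y (List.mem_cons_of_mem _ hy); omega)
        (fun he => hxt (he ▸ hy))]

-- membership in A's inner range: multiples k*elf, 1 ≤ k ≤ 50, below min(data, 51*elf)
theorem mem_innerRange (data elf x : Int) (h1 : 1 ≤ elf) :
    x ∈ PySem.List.pyRange elf (min data (elf + elf * 50)) elf ↔
      elf ≤ x ∧ x < min data (elf + elf * 50) ∧ elf ∣ x := by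
  rw [PySem.List.mem_pyRange_iff_of_pos (by omega)]
  constructor
  · rintro ⟨ha, hb, hc⟩
    exact ⟨ha, hb, by simpa using dvd_add hc (dvd_refl elf)⟩
  · rintro ⟨ha, hb, hc⟩
    exact ⟨ha, hb, dvd_sub hc (dvd_refl elf)⟩

theorem nodup_innerRange (data elf : Int) (h1 : 1 ≤ elf) :
    (PySem.List.pyRange elf (min data (elf + elf * 50)) elf).Nodup := by
  rw [PySem.List.pyRange_of_pos _ _ (by omega)]
  refine List.Nodup.map ?_ (List.nodup_range)
  intro a b hab
  dsimp only at hab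
  have : elf * (a : Int) = elf * (b : Int) := by omega
  have := mul_left_cancel₀ (by omega : elf ≠ 0) this
  exact_mod_cast this

-- invariant on happy_house after elves 1..E have run
def InvHappy (data happy : Int) (E : ℕ) : Prop :=
  (happy = 10 ^ 18 ∧ ∀ h : ℕ, 1 ≤ h → (h : Int) < data → ¬(data ≤ 11 * (sigN h E : Int)))
  ∨ (1 ≤ happy ∧ happy < data ∧ data ≤ 11 * (sigN happy.toNat E : Int)
     ∧ ∀ h : ℕ, 1 ≤ h → (h : Int) < happy → ¬(data ≤ 11 * (sigN h E : Int)))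

theorem altLoop_hit (data : Int) (a : Int) (had : a < data)
    (hhit : data ≤ 11 * part2AltSig a)
    (hmin : ∀ h : Int, 1 ≤ h → h < a → ¬(data ≤ 11 * part2AltSig h)) :
    ∀ (fuel : ℕ) (x : Int), (a - x).toNat < fuel → 1 ≤ x → x ≤ a →
      part2AltLoop data x = a := by
  intro fuel
  induction fuel with
  | zero => intro x hf; omega
  | succ fuel ih =>
    intro x hf hx1 hxa
    rw [part2AltLoop, if_pos (by omega)]
    by_cases hc : data ≤ 11 * part2AltSig x
    · rw [if_pos hc]
      by_contra hne
      exact hmin x hx1 (by omega) hc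
    · rw [if_neg hc]
      have hxa' : x < a := by
        rcases lt_or_eq_of_le hxa with h | h
        · exact h
        · exact absurd (h ▸ hhit) hc
      exact ih (x + 1) (by omega) (by omega) (by omega)

theorem altLoop_none (data : Int)
    (hmiss : ∀ h : Int, 1 ≤ h → h < data → ¬(data ≤ 11 * part2AltSig h)) :
    ∀ (fuel : ℕ) (x : Int), (data - x).toNat < fuel → 1 ≤ x →
      part2AltLoop data x = 10 ^ 18 := by
  intro fuel
  induction fuel with
  | zero => intro x hf; omega
  | succ fuel ih =>
    intro x hf hx1
    rw [part2AltLoop]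
    by_cases hx : x < data
    · rw [if_pos hx, if_neg (hmiss x hx1 hx)]
      exact ih (x + 1) (by omega) (by omega)
    · rw [if_neg hx]

theorem loop_main (data : Int) (hd : data ≤ 2 ^ 31) :
    ∀ (fuel : ℕ) (elf : Int) (houses : List Int) (happy : Int),
      (min data happy - elf).toNat < fuel →
      1 ≤ elf →
      houses.length = data.toNat →
      (∀ i : ℕ, i < houses.length →
        houses.getD i 0 = if i = 0 then 0 else 11 * (sigN i (elf - 1).toNat : Int)) →
      InvHappy data happy (elf - 1).toNat →
      part2Loop data houses happy elf = part2AltLoop data 1 := by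
  intro fuel
  induction fuel with
  | zero => intro elf houses happy hf; omega
  | succ fuel ih =>
    intro elf houses happy hf helf hlen hent hinv
    set E : ℕ := (elf - 1).toNat with hE
    have helfE : elf = ((E + 1 : ℕ) : Int) := by omega
    rw [part2Loop]
    by_cases hcont : elf < min data happy
    · -- ===== continue case =====
      rw [if_pos hcont]
      show part2Loop data
        ((PySem.List.pyRange elf (min data (elf + elf * 50)) elf).foldl
          (part2InnerStep data elf) (houses, happy)).1
        ((PySem.List.pyRange elf (min data (elf + elf * 50)) elf).foldl
          (part2InnerStep data elf) (houses, happy)).2 (elf + 1) = part2AltLoop data 1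
      set L := PySem.List.pyRange elf (min data (elf + elf * 50)) elf with hL
      have hpos : ∀ x ∈ L, 1 ≤ x := by
        intro x hx
        rw [hL, mem_innerRange data elf x helf] at hx
        omega
      have hnd : L.Nodup := hL ▸ nodup_innerRange data elf helf
      obtain ⟨flen, fget, fsnd⟩ := innerFold_spec data elf L houses happy hpos hnd
      set st := L.foldl (part2InnerStep data elf) (houses, happy) with hst
      have hNatInt : ∀ i : ℕ, ((E + 1) ∣ i ∧ i ≤ 50 * (E + 1)) ↔
          (elf ∣ (i : Int) ∧ (i : Int) ≤ 50 * elf) := by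
        intro i
        rw [helfE]
        constructor
        · rintro ⟨hd1, hd2⟩
          exact ⟨Int.natCast_dvd_natCast.mpr hd1, by push_cast; omega⟩
        · rintro ⟨hd1, hd2⟩
          exact ⟨Int.natCast_dvd_natCast.mp hd1, by push_cast at hd2; omega⟩
      have hmemchar : ∀ i : ℕ, 1 ≤ i → i < houses.length →
          (((i : Int) ∈ L) ↔ (elf ∣ (i : Int) ∧ (i : Int) ≤ 50 * elf)) := by
        intro i hi1 hilen
        have hid : (i : Int) < data := by omega
        rw [hL, mem_innerRange data elf _ helf]
        constructor
        · rintro ⟨ha, hb, hc⟩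
          refine ⟨hc, ?_⟩
          obtain ⟨m, hm⟩ := hc
          have hm51 : m < 51 := by
            by_contra hm51
            have : elf * 51 ≤ elf * m := by
              apply mul_le_mul_of_nonneg_left (by omega) (by omega)
            omega
          have : elf * m ≤ elf * 50 := by
            apply mul_le_mul_of_nonneg_left (by omega) (by omega)
          omega
        · rintro ⟨hc, hb⟩
          refine ⟨Int.le_of_dvd (by omega) hc, by omega, hc⟩
      have hcond : ∀ h : Int, h ∈ L →
          ((data ≤ PySem.List.pyGetD houses h 0 + 11 * elf) ↔
           (data ≤ 11 * (sigN h.toNat (E + 1) : Int))) := by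
        intro h hm
        have h1h : 1 ≤ h := hpos h hm
        have hhd : h < data := by
          have := (mem_innerRange data elf h helf).mp (hL ▸ hm)
          omega
        have hlt : h.toNat < houses.length := by omega
        rw [PySem.List.pyGetD_of_nonneg _ _ (by omega)]
        rw [hent h.toNat hlt, if_neg (by omega : ¬h.toNat = 0)]
        have hmem' : ((h.toNat : ℕ) : Int) ∈ L := by
          rw [show ((h.toNat : ℕ) : Int) = h by omega]
          exact hm
        have hc : (E + 1) ∣ h.toNat ∧ h.toNat ≤ 50 * (E + 1) :=
          (hNatInt h.toNat).mpr ((hmemchar h.toNat (by omega) hlt).mp hmem')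
        rw [sig_succ, if_pos hc]
        push_cast
        constructor <;> intro <;> omega
      have hstab2 : ∀ h : ℕ, 1 ≤ h → (h : Int) < data → ((h : Int) ∉ L) →
          sigN h (E + 1) = sigN h E := by
        intro h hh1 hhd hnm
        rw [sig_succ, if_neg, Nat.add_zero]
        intro hc
        exact hnm ((hmemchar h hh1 (by omega)).mpr ((hNatInt h).mp hc))
      have hle : st.2 ≤ happy := by
        rw [hst, fsnd]; exact happyFold_le data elf houses L happy
      have hEnew : (elf + 1 - 1).toNat = E + 1 := by omega
      apply ih (elf + 1) st.1 st.2 (by omega) (by omega) (by rw [flen, hlen])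
      · -- entries
        intro i hi
        rw [flen] at hi
        rw [fget i, hEnew]
        by_cases hi0 : i = 0
        · subst hi0
          have h0nm : ¬((0 : ℕ) : Int) ∈ L := by
            intro h0L
            have := (mem_innerRange data elf _ helf).mp (hL ▸ h0L)
            simp at this
            omega
          rw [hent 0 hi, if_pos rfl, if_pos rfl, if_neg (fun hand => h0nm hand.1)]
          norm_num
        · have hi1 : 1 ≤ i := by omega
          rw [hent i hi, if_neg hi0, if_neg hi0, sig_succ]
          by_cases hc : (E + 1) ∣ i ∧ i ≤ 50 * (E + 1)
          · rw [if_pos hc, if_pos ⟨(hmemchar i hi1 hi).mpr ((hNatInt i).mp hc), hi⟩]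
            push_cast
            omega
          · rw [if_neg hc,
              if_neg (fun hand => hc ((hNatInt i).mpr ((hmemchar i hi1 hi).mp hand.1)))]
            push_cast
            omega
      · -- invariant
        rw [hEnew]
        by_cases hH : st.2 = 10 ^ 18
        · left
          refine ⟨hH, ?_⟩
          rcases hinv with ⟨h18, hnone⟩ | ⟨hh1, hh2, -, -⟩
          · intro h hh1 hhd hcontr
            by_cases hm : ((h : ℕ) : Int) ∈ L
            · have := happyFold_le_mem data elf houses L happy (h : Int) hm
                ((hcond (h : Int) hm).mpr (by simpa using hcontr))
              rw [← fsnd] at this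
              omega
            · rw [hstab2 h hh1 hhd hm] at hcontr
              exact hnone h hh1 hhd hcontr
          · omega
        · right
          have hcases := happyFold_cases data elf houses L happy
          rw [← fsnd] at hcases
          have hst2lt : st.2 < data := by
            rcases hcases with heq | ⟨h0, hm0, -, heq⟩
            · rcases hinv with ⟨h18, -⟩ | ⟨-, hh2, -, -⟩
              · omega
              · omega
            · have := (mem_innerRange data elf h0 helf).mp (hL ▸ hm0)
              omega
          have hminNew : ∀ h : ℕ, 1 ≤ h → (h : Int) < st.2 →
              ¬(data ≤ 11 * (sigN h (E + 1) : Int)) := by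
            intro h hh1 hhlt hcontr
            by_cases hm : ((h : ℕ) : Int) ∈ L
            · have := happyFold_le_mem data elf houses L happy (h : Int) hm
                ((hcond (h : Int) hm).mpr (by simpa using hcontr))
              rw [← fsnd] at this
              omega
            · rw [hstab2 h hh1 (by omega) hm] at hcontr
              rcases hinv with ⟨-, hnone⟩ | ⟨-, -, -, hmin⟩
              · exact hnone h hh1 (by omega) hcontr
              · exact hmin h hh1 (by omega) hcontr
          rcases hcases with heq | ⟨h0, hm0, hc0, heq⟩
          · rcases hinv with ⟨h18, -⟩ | ⟨hh1, hh2, hh3, -⟩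
            · omega
            · refine ⟨by omega, by omega, ?_, hminNew⟩
              rw [heq]
              have := sig_mono happy.toNat (show E ≤ E + 1 by omega)
              omega
          · have h01 : 1 ≤ h0 := hpos h0 hm0
            refine ⟨by omega, by omega, ?_, hminNew⟩
            rw [heq]
            exact (hcond h0 hm0).mp hc0
    · -- ===== exit case =====
      rw [if_neg hcont]
      rcases hinv with ⟨h18, hnone⟩ | ⟨hh1, hh2, hh3, hmin⟩
      · subst h18
        have hed : data ≤ elf := by omega
        rw [altLoop_none data ?_ ((data - 1).toNat + 1) 1 (by omega) (by omega)]
        intro h hh1 hhd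
        rw [altSig_eq h hh1, ← sig_stable h.toNat (by omega) (by omega : h.toNat ≤ E)]
        exact hnone h.toNat (by omega) (by omega)
      · have hhe : happy ≤ elf := by omega
        have hhit : data ≤ 11 * part2AltSig happy := by
          rw [altSig_eq happy hh1]
          have := sig_le_full happy.toNat E (by omega)
          omega
        have hmin' : ∀ h : Int, 1 ≤ h → h < happy → ¬(data ≤ 11 * part2AltSig h) := by
          intro h h1h hha
          rw [altSig_eq h h1h, ← sig_stable h.toNat (by omega) (by omega : h.toNat ≤ E)]
          exact hmin h.toNat (by omega) (by omega)
        rw [altLoop_hit data happy hh2 hhit hmin' ((happy - 1).toNat + 1) 1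
          (by omega) (by omega) (by omega)]

-- ===== VERDICT (by name: the statement is the Claim_ definition above) =====
theorem part2_spec : Claim_equal_part2 := by
  intro data ans1 hdom
  have hd : data ≤ 2 ^ 31 := by
    unfold Dom_part2 pvDomInt at hdom
    simp only [Bool.and_eq_true, decide_eq_true_eq] at hdom
    omega
  unfold Spec_part2 part2 part2_alt
  apply loop_main data hd ((min data (10 ^ 18) - 1).toNat + 1) 1 _ _ (by omega) (by omega)
  · exact List.length_replicate
  · intro i hi
    rw [List.getD_eq_getElem?_getD, List.getElem?_replicate_of_lt (by simpa using hi)]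
    rw [show ((1:Int) - 1).toNat = 0 from rfl]
    simp [sig_zero]
  · left
    refine ⟨rfl, fun h hh1 hhd => ?_⟩
    rw [show ((1:Int) - 1).toNat = 0 from rfl, sig_zero]
    omega
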